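-- pv_equiv track=rewrite | github.com/KnottyDyes/cribl-hc | src/cribl_hc/analyzers/config.py | _calculate_pipeline_complexity
-- ===== SOURCE A (Python) =====
-- from typing import Any, Dict, List, Set
--
-- def _calculate_pipeline_complexity(functions: List[Dict[str, Any]]) -> int:
--     """
--     Calculate complexity score for a pipeline.
--
--     Factors:
--     - Number of functions (2 points each)
--     - Nested expressions/conditionals (5 points each level)
--     - Function configuration complexity (1-3 points based on config size)
--
--     Returns:
--         Complexity score (0-100+, higher = more complex)
--     """
--     if not functions:
--         return 0
--
--     complexity = 0
--
--     # Base complexity from function count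
--     complexity += len(functions) * 2
--
--     # Analyze each function's configuration
--     for func in functions:
--         func_conf = func.get("conf", {})
--
--         # Check for nested conditions/filters
--         filter_expr = func_conf.get("filter", "")
--         if filter_expr:
--             # Count nesting depth by parentheses
--             max_depth = 0
--             current_depth = 0
--             for char in filter_expr:
--                 if char == '(':
--                     current_depth += 1
--                     max_depth = max(max_depth, current_depth)
--                 elif char == ')':
--                     current_depth -= 1
--
--             complexity += max_depth * 5
--
--         # Complex eval expressions
--         eval_expr = func_conf.get("expression", "")
--         if eval_expr and len(eval_expr) > 50:
--             complexity += 3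
--
--         # Large configuration objects indicate complexity
--         if len(func_conf) > 5:
--             complexity += 2
--
--     return min(complexity, 100)  # Cap at 100
-- ===== SOURCE B (Python) =====
-- from functools import reduce
-- from typing import Any, Dict, List
--
-- def _depth(expr: str) -> int:
--     # Back-to-front recurrence: D(c::rest) = max(0, delta(c) + D(rest)); D("") = 0.
--     # This equals A's forward max-tracking scan (max(0, max prefix balance)).
--     return reduce(lambda acc, c: max(0, (1 if c == '(' else -1 if c == ')' else 0) + acc),
--                   reversed(expr), 0)
--
-- def _calculate_pipeline_complexity(functions: List[Dict[str, Any]]) -> int: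
--     if not functions:
--         return 0
--     confs = [f.get("conf", {}) for f in functions]
--     score = (2 * len(functions)
--              + 5 * sum(_depth(c.get("filter", "")) for c in confs)
--              + 3 * sum(len(c.get("expression", "")) > 50 for c in confs)
--              + 2 * sum(len(c) > 5 for c in confs))
--     return min(score, 100)
-- ===== Notes on version B (the rewrite author's own statement) =====
-- stated objective: alternative
-- what changed: Replaces A's single stateful loop (running balance + max tracking per function, accumulated into one complexity variable) by staged passes: confs are extracted once, the four score components are computed as separate sums, and nesting depth is computed by a back-to-front recurrence D(c::rest)=max(0,delta(c)+D(rest)) over the reversed string instead of a forward balance/max scan.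
import Mathlib
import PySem

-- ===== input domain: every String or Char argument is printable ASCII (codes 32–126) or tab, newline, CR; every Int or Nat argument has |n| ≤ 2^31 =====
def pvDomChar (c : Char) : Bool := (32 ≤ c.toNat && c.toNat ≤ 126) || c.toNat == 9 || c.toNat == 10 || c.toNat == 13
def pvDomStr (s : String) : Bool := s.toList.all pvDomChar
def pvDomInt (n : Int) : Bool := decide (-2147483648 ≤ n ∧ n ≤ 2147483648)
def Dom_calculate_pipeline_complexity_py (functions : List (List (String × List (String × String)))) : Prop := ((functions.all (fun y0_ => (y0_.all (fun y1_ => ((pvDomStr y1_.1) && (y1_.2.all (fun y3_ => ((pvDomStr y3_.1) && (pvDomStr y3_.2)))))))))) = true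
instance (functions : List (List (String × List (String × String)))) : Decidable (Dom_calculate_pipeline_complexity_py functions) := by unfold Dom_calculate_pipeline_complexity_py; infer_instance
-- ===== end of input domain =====

-- ===== PORT A =====
-- B stages the computation: confs extracted once, four component sums added, and nesting
-- depth computed by a back-to-front recurrence over the reversed string (objective: alternative).
-- dict.get(k, dflt) on an association list: first match (shared by both ports)
def pvGetD {α : Type} (xs : List (String × α)) (k : String) (dflt : α) : α :=
  match xs with
  | [] => dflt
  | (k', v) :: t => if k' = k then v else pvGetD t k dflt

def calculate_pipeline_complexity_py (functions : List (List (String × List (String × String)))) : Int :=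
  if functions = [] then 0
  else
    let complexity : Int := (functions.length : Int) * 2
    let complexity := functions.foldl (fun complexity func =>
      let func_conf := pvGetD func "conf" []
      let filter_expr := pvGetD func_conf "filter" ""
      let complexity :=
        if filter_expr.toList ≠ [] then          -- Python truthiness of a string
          let p := filter_expr.toList.foldl (fun (st : Int × Int) ch =>
            if ch = '(' then (max st.1 (st.2 + 1), st.2 + 1)
            else if ch = ')' then (st.1, st.2 - 1)
            else st) ((0 : Int), (0 : Int))
          complexity + p.1 * 5
        else complexity
      let eval_expr := pvGetD func_conf "expression" ""
      let complexity :=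
        if eval_expr.toList ≠ [] ∧ PySem.Str.len eval_expr > 50 then complexity + 3 else complexity
      if (func_conf.length : Int) > 5 then complexity + 2 else complexity) complexity
    min complexity 100

-- ===== PORT B =====
def pvDelta (c : Char) : Int := if c = '(' then 1 else if c = ')' then -1 else 0

-- reduce(lambda acc, c: max(0, delta(c) + acc), reversed(expr), 0)
def pvDepth (expr : String) : Int :=
  expr.toList.reverse.foldl (fun acc c => max 0 (pvDelta c + acc)) 0

def calculate_pipeline_complexity_py_alt (functions : List (List (String × List (String × String)))) : Int :=
  if functions = [] then 0
  else
    let confs := functions.map (fun f => pvGetD f "conf" [])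
    let score : Int := 2 * (functions.length : Int)
      + 5 * (confs.map (fun c => pvDepth (pvGetD c "filter" ""))).sum
      + 3 * (confs.map (fun c => if PySem.Str.len (pvGetD c "expression" "") > 50 then (1 : Int) else 0)).sum
      + 2 * (confs.map (fun c => if (c.length : Int) > 5 then (1 : Int) else 0)).sum
    min score 100

-- ===== PRECONDITION & SPEC =====
def Spec_calculate_pipeline_complexity_py (functions : List (List (String × List (String × String)))) (out : Int) : Prop := out = calculate_pipeline_complexity_py_alt functions
instance (functions : List (List (String × List (String × String)))) (out : Int) : Decidable (Spec_calculate_pipeline_complexity_py functions out) := by unfold Spec_calculate_pipeline_complexity_py; infer_instance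

-- ===== CLAIM (what is proved, stated in full; the proofs are below) =====
def Claim_equal_calculate_pipeline_complexity_py : Prop := ∀ (functions : List (List (String × List (String × String)))), Dom_calculate_pipeline_complexity_py functions → Spec_calculate_pipeline_complexity_py functions (calculate_pipeline_complexity_py functions)

-- ===== LEMMAS AND PROOFS =====

-- B's right-to-left recurrence, as a foldr (pvDepth unfolds to it via List.foldl_reverse)
def pvR (l : List Char) : Int := l.foldr (fun c acc => max 0 (pvDelta c + acc)) 0

theorem pvR_nonneg (l : List Char) : 0 ≤ pvR l := by
  cases l <;> simp [pvR]

theorem pvDepth_eq_pvR (s : String) : pvDepth s = pvR s.toList := by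
  unfold pvDepth pvR
  rw [List.foldl_reverse]

-- A's forward max-tracking scan from any state (md, cd) with cd ≤ md computes max md (cd + pvR l).
theorem pv_scan_eq (l : List Char) : ∀ (md cd : Int), cd ≤ md →
    (l.foldl (fun (st : Int × Int) ch =>
      if ch = '(' then (max st.1 (st.2 + 1), st.2 + 1)
      else if ch = ')' then (st.1, st.2 - 1)
      else st) (md, cd)).1
    = max md (cd + pvR l) := by
  induction l with
  | nil => intro md cd h; simp [pvR, max_eq_left h]
  | cons c t ih =>
    intro md cd h
    have hR := pvR_nonneg t
    simp only [List.foldl_cons]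
    by_cases h1 : c = '('
    · subst h1
      simp only [reduceIte]
      rw [ih (max md (cd + 1)) (cd + 1) (le_max_right _ _)]
      have : pvR ('(' :: t) = max 0 (1 + pvR t) := by simp [pvR, pvDelta]
      rw [this]
      omega
    · by_cases h2 : c = ')'
      · subst h2
        simp only [if_neg h1, reduceIte]
        rw [ih md (cd - 1) (by omega)]
        have : pvR (')' :: t) = max 0 (-1 + pvR t) := by simp [pvR, pvDelta]
        rw [this]
        omega
      · have hz : pvDelta c = 0 := by simp [pvDelta, h1, h2]
        simp only [if_neg h1, if_neg h2]
        rw [ih md cd h]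
        have : pvR (c :: t) = max 0 (pvDelta c + pvR t) := by simp [pvR]
        rw [this, hz]
        omega

-- per-conf score used to bridge the two ports
def pvConfScore (c : List (String × String)) : Int :=
  5 * pvDepth (pvGetD c "filter" "")
    + (if PySem.Str.len (pvGetD c "expression" "") > 50 then 3 else 0)
    + (if (c.length : Int) > 5 then 2 else 0)

-- A's per-function step adds exactly pvConfScore of its conf.
theorem pv_step_eq (func : List (String × List (String × String))) (acc : Int) :
    (let func_conf := pvGetD func "conf" []
     let filter_expr := pvGetD func_conf "filter" ""
     let acc1 :=
       if filter_expr.toList ≠ [] then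
         let p := filter_expr.toList.foldl (fun (st : Int × Int) ch =>
           if ch = '(' then (max st.1 (st.2 + 1), st.2 + 1)
           else if ch = ')' then (st.1, st.2 - 1)
           else st) ((0 : Int), (0 : Int))
         acc + p.1 * 5
       else acc
     let eval_expr := pvGetD func_conf "expression" ""
     let acc2 :=
       if eval_expr.toList ≠ [] ∧ PySem.Str.len eval_expr > 50 then acc1 + 3 else acc1
     if ((pvGetD func "conf" []).length : Int) > 5 then acc2 + 2 else acc2)
    = acc + pvConfScore (pvGetD func "conf" []) := by
  simp only [pvConfScore]
  set conf := pvGetD func "conf" [] with hconf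
  have hlen : PySem.Str.len (pvGetD conf "expression" "")
      = ((pvGetD conf "expression" "").toList.length : Int) := PySem.Str.len_eq _
  have key : ((pvGetD conf "expression" "").toList ≠ [] ∧
      PySem.Str.len (pvGetD conf "expression" "") > 50) ↔
      PySem.Str.len (pvGetD conf "expression" "") > 50 := by
    constructor
    · exact fun h => h.2
    · intro h
      refine ⟨?_, h⟩
      intro hnil
      rw [hlen, hnil] at h
      simp at h
  simp only [key]
  by_cases hf : (pvGetD conf "filter" "").toList = []
  · have hd : pvDepth (pvGetD conf "filter" "") = 0 := by
      rw [pvDepth_eq_pvR, hf]; rfl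
    rw [hd]
    simp only [hf, ne_eq, not_true_eq_false, if_false]
    split_ifs <;> ring
  · rw [if_pos hf, pv_scan_eq _ 0 0 le_rfl]
    rw [pvDepth_eq_pvR]
    have := pvR_nonneg (pvGetD conf "filter" "").toList
    have hmax : max (0:Int) (0 + pvR (pvGetD conf "filter" "").toList)
        = pvR (pvGetD conf "filter" "").toList := by omega
    rw [hmax]
    split_ifs <;> ring

-- A's whole loop over the functions equals the sum of per-conf scores.
theorem pv_fold_eq (fs : List (List (String × List (String × String)))) : ∀ (acc : Int),
    fs.foldl (fun complexity func =>
      let func_conf := pvGetD func "conf" []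
      let filter_expr := pvGetD func_conf "filter" ""
      let complexity :=
        if filter_expr.toList ≠ [] then
          let p := filter_expr.toList.foldl (fun (st : Int × Int) ch =>
            if ch = '(' then (max st.1 (st.2 + 1), st.2 + 1)
            else if ch = ')' then (st.1, st.2 - 1)
            else st) ((0 : Int), (0 : Int))
          complexity + p.1 * 5
        else complexity
      let eval_expr := pvGetD func_conf "expression" ""
      let complexity :=
        if eval_expr.toList ≠ [] ∧ PySem.Str.len eval_expr > 50 then complexity + 3 else complexity
      if (func_conf.length : Int) > 5 then complexity + 2 else complexity) acc
    = acc + (fs.map (fun f => pvConfScore (pvGetD f "conf" []))).sum := by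
  induction fs with
  | nil => intro acc; simp
  | cons f t ih =>
    intro acc
    rw [List.foldl_cons, ih, List.map_cons, List.sum_cons, pv_step_eq f acc]
    ring

-- B's three staged component sums recombine into the single sum of per-conf scores.
theorem pv_sums_eq (cs : List (List (String × String))) :
    5 * (cs.map (fun c => pvDepth (pvGetD c "filter" ""))).sum
      + 3 * (cs.map (fun c => if PySem.Str.len (pvGetD c "expression" "") > 50 then (1 : Int) else 0)).sum
      + 2 * (cs.map (fun c => if (c.length : Int) > 5 then (1 : Int) else 0)).sum
    = (cs.map pvConfScore).sum := by
  induction cs with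
  | nil => simp
  | cons c t ih =>
    simp only [List.map_cons, List.sum_cons]
    rw [← ih]
    simp only [pvConfScore]
    split_ifs <;> ring

-- ===== VERDICT (by name: the statement is the Claim_ definition above) =====
theorem calculate_pipeline_complexity_py_spec : Claim_equal_calculate_pipeline_complexity_py := by
  intro functions _
  unfold Spec_calculate_pipeline_complexity_py
  unfold calculate_pipeline_complexity_py calculate_pipeline_complexity_py_alt
  by_cases h : functions = []
  · simp [h]
  · simp only [if_neg h]
    have hs := pv_sums_eq (functions.map (fun f => pvGetD f "conf" []))
    rw [pv_fold_eq]
    simp only [List.map_map, Function.comp_def] at hs ⊢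
    omega
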